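-- pv_equiv track=rewrite | github.com/namel3ss-Ai/namel3ss | src/namel3ss/module_loader/resolve.py | _split_list_type
-- ===== SOURCE A (Python) =====
-- def _split_list_type(type_name: str) -> str | None:
--     if not type_name.startswith("list<"):
--         return None
--     depth = 0
--     start = None
--     end = None
--     for idx, ch in enumerate(type_name):
--         if ch == "<":
--             depth += 1
--             if depth == 1:
--                 start = idx + 1
--         elif ch == ">":
--             depth -= 1
--             if depth == 0:
--                 end = idx
--                 break
--     if start is None or end is None or end != len(type_name) - 1:
--         return None
--     inner = type_name[start:end].strip()
--     if not inner:
--         return None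
--     return inner
-- ===== SOURCE B (Python) =====
-- def _skip_balanced(type_name, i):
--     """Recursive-descent matcher: consume characters from position i until the
--     '<' opened just before i is closed; return the index just after that '>',
--     or None if it is never closed."""
--     while i < len(type_name):
--         ch = type_name[i]
--         if ch == ">":
--             return i + 1
--         if ch == "<":
--             i = _skip_balanced(type_name, i + 1)
--             if i is None:
--                 return None
--         else:
--             i += 1
--     return None
--
--
-- def _split_list_type(type_name: str) -> str | None:
--     if not type_name.startswith("list<"):
--         return None
--     j = _skip_balanced(type_name, 5)
--     if j != len(type_name):
--         return None
--     inner = type_name[5:j - 1].strip()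
--     return inner or None
-- ===== Notes on version B (the rewrite author's own statement) =====
-- stated objective: alternative
-- what changed: B replaces A's single enumerate pass with a mutable depth counter and optional start/end indices by a recursive-descent matcher: a helper recursively consumes the balanced region opened by 'list<' and returns the index just after its matching '>', which must be the end of the string.
import Mathlib
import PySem

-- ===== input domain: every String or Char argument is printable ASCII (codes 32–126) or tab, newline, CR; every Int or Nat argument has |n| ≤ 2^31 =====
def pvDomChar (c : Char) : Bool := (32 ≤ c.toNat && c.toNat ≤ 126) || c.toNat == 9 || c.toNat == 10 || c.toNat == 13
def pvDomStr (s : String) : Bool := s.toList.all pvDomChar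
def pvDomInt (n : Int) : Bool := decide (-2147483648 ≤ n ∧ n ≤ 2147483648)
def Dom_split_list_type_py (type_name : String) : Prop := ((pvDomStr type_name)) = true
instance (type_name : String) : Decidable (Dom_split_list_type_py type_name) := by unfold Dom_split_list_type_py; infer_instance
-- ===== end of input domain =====

-- B replaces A's depth-counter scan with a recursive-descent bracket matcher (objective: alternative).

-- ===== PORT A =====
-- the `for idx, ch in enumerate(type_name)` loop with its mutable depth/start/end and the break
def splitLoopA (cs : List Char) (idx depth : Int) (start fin : Option Int) : Option Int × Option Int :=
  match cs with
  | [] => (start, fin)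
  | ch :: rest =>
    if ch = '<' then
      splitLoopA rest (idx + 1) (depth + 1) (if depth + 1 = 1 then some (idx + 1) else start) fin
    else if ch = '>' then
      if depth - 1 = 0 then (start, some idx)          -- break
      else splitLoopA rest (idx + 1) (depth - 1) start fin
    else splitLoopA rest (idx + 1) depth start fin

def split_list_type_py (type_name : String) : Option String :=
  if PySem.Str.startswith type_name "list<" = false then none
  else
    match splitLoopA type_name.toList 0 0 none none with
    | (some s, some e) =>
      if e ≠ PySem.Str.len type_name - 1 then none
      else
        let inner := PySem.Chars.strip (PySem.Chars.slice type_name.toList (some s) (some e))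
        if inner = [] then none else some (String.ofList inner)
    | _ => none

-- ===== PORT B =====
-- `_skip_balanced(type_name, i)`: Python walks an index i over the tail of the string; the
-- port walks the corresponding suffix list (Python's returned index j ↔ the suffix from j,
-- so `j == len(type_name)` ↔ the returned suffix is []).  The subtype bound
-- `r.length < cs.length` is only the totality guard for the nested recursive call.
def skipBal : (cs : List Char) → Option {r : List Char // r.length < cs.length}
  | [] => none
  | ch :: rest =>
    if ch = '>' then some ⟨rest, by simp⟩
    else if ch = '<' then
      match skipBal rest with
      | none => none
      | some ⟨r, hr⟩ =>
        match skipBal r with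
        | none => none
        | some ⟨r2, hr2⟩ => some ⟨r2, by simp only [List.length_cons]; omega⟩
    else
      match skipBal rest with
      | none => none
      | some ⟨r, hr⟩ => some ⟨r, by simp only [List.length_cons]; omega⟩
termination_by cs => cs.length
decreasing_by
  · simp only [List.length_cons]; omega
  · simp only [List.length_cons]; omega
  · simp only [List.length_cons]; omega

def split_list_type_py_alt (type_name : String) : Option String :=
  if PySem.Str.startswith type_name "list<" = false then none
  else
    -- j = _skip_balanced(type_name, 5); `j != len(type_name)` (incl. j = None) → None;
    -- `type_name[5:j-1]` is then the tail after "list<" without its final '>', i.e. dropLast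
    match (skipBal (type_name.toList.drop 5)).map Subtype.val with
    | none => none
    | some (_ :: _) => none
    | some [] =>
      let inner := PySem.Chars.strip ((type_name.toList.drop 5).dropLast)
      if inner = [] then none else some (String.ofList inner)

-- ===== PRECONDITION & SPEC =====
def Spec_split_list_type_py (type_name : String) (out : Option String) : Prop := out = split_list_type_py_alt type_name
instance (type_name : String) (out : Option String) : Decidable (Spec_split_list_type_py type_name out) := by unfold Spec_split_list_type_py; infer_instance

-- ===== CLAIM (what is proved, stated in full; the proofs are below) =====
def Claim_equal_split_list_type_py : Prop := ∀ (type_name : String), Dom_split_list_type_py type_name → Spec_split_list_type_py type_name (split_list_type_py type_name)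

-- ===== LEMMAS AND PROOFS =====

-- position (within cs) of the first char where the depth counter, started at d, returns to 0
def closePos (cs : List Char) (d : Int) : Option Nat :=
  match cs with
  | [] => none
  | ch :: rest =>
    if ch = '<' then (closePos rest (d + 1)).map (· + 1)
    else if ch = '>' then
      if d - 1 = 0 then some 0 else (closePos rest (d - 1)).map (· + 1)
    else (closePos rest d).map (· + 1)

theorem splitLoopA_char (cs : List Char) (idx d : Int) (s : Option Int) (hd : 1 ≤ d) :
    splitLoopA cs idx d s none = (s, Option.map (fun i : Nat => (i : Int) + idx) (closePos cs d)) := by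
  induction cs generalizing idx d with
  | nil => simp [splitLoopA, closePos]
  | cons ch rest ih =>
    by_cases h1 : ch = '<'
    · subst h1
      simp only [splitLoopA, closePos, if_true, if_neg (show ¬ ('<' : Char) = '>' by decide),
        if_neg (show ¬ d + 1 = 1 by omega), ih (idx + 1) (d + 1) (by omega)]
      cases closePos rest (d + 1) with
      | none => simp
      | some n => simp; omega
    · by_cases h2 : ch = '>'
      · subst h2
        simp only [splitLoopA, closePos, if_neg h1]
        by_cases h3 : d - 1 = 0
        · simp [h3]
        · simp only [if_neg h3, ih (idx + 1) (d - 1) (by omega)]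
          cases closePos rest (d - 1) with
          | none => simp
          | some n => simp; omega
      · simp only [splitLoopA, closePos, if_neg h1, if_neg h2, ih (idx + 1) d hd]
        cases closePos rest d with
        | none => simp
        | some n => simp; omega

theorem closePos_lt (cs : List Char) (d : Int) (n : Nat) (h : closePos cs d = some n) :
    n < cs.length := by
  induction cs generalizing d n with
  | nil => simp [closePos] at h
  | cons ch rest ih =>
    simp only [closePos] at h
    split_ifs at h with h1 h2 h3
    · obtain ⟨m, hm, rfl⟩ := Option.map_eq_some_iff.mp h
      simpa using Nat.succ_lt_succ (ih _ _ hm)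
    · have : n = 0 := by simpa using h.symm
      subst this
      simp
    · obtain ⟨m, hm, rfl⟩ := Option.map_eq_some_iff.mp h
      simpa using Nat.succ_lt_succ (ih _ _ hm)
    · obtain ⟨m, hm, rfl⟩ := Option.map_eq_some_iff.mp h
      simpa using Nat.succ_lt_succ (ih _ _ hm)

theorem nest_shift (o : Option Nat) (k : Nat) :
    Option.map ((fun x => x + 1) ∘ fun m => k + 1 + m) o = Option.map (fun m => k + 1 + 1 + m) o := by
  cases o with
  | none => rfl
  | some m =>
    simp only [Option.map_some, Function.comp_apply, Option.some.injEq]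
    omega

theorem closePos_cons_gt (rest : List Char) (d : Int) :
    closePos ('>' :: rest) d
      = if d - 1 = 0 then some 0 else (closePos rest (d - 1)).map (· + 1) := by
  simp [closePos]

-- the first return to depth 0 from d+1 factors through the first return from d
theorem closePos_nest (cs : List Char) (d : Int) (hd : 1 ≤ d) :
    closePos cs (d + 1)
      = (closePos cs d).bind (fun n => (closePos (cs.drop (n + 1)) 1).map (fun m => n + 1 + m)) := by
  induction cs generalizing d with
  | nil => simp [closePos]
  | cons ch rest ih =>
    by_cases h1 : ch = '<'
    · subst h1
      simp only [closePos, if_true, if_neg (show ¬ ('<' : Char) = '>' by decide)]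
      rw [ih (d + 1) (by omega)]
      cases closePos rest (d + 1) with
      | none => rfl
      | some k =>
        simp only [Option.bind_some, Option.map_some, Option.map_map, List.drop_succ_cons]
        exact nest_shift _ k
    · by_cases h2 : ch = '>'
      · subst h2
        rw [closePos_cons_gt rest (d + 1), if_neg (show ¬ d + 1 - 1 = 0 by omega),
          show d + 1 - 1 = d from by ring, closePos_cons_gt rest d]
        by_cases h3 : d - 1 = 0
        · rw [if_pos h3]
          have hd1 : d = 1 := by omega
          subst hd1
          rw [Option.bind_some]
          simp only [List.drop_succ_cons, List.drop_zero]
          cases closePos rest 1 with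
          | none => rfl
          | some m => simp only [Option.map_some, Option.some.injEq]; omega
        · rw [if_neg h3]
          have hih := ih (d - 1) (by omega)
          rw [show d - 1 + 1 = d from by ring] at hih
          rw [hih]
          cases closePos rest (d - 1) with
          | none => rfl
          | some k =>
            simp only [Option.bind_some, Option.map_some, Option.map_map, List.drop_succ_cons]
            exact nest_shift _ k
      · simp only [closePos, if_neg h1, if_neg h2]
        rw [ih d hd]
        cases closePos rest d with
        | none => rfl
        | some k =>
          simp only [Option.bind_some, Option.map_some, Option.map_map, List.drop_succ_cons]
          exact nest_shift _ k

-- the recursive-descent matcher returns exactly the suffix after the first return to depth 0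
theorem skipBal_eq_aux : ∀ (n : Nat) (cs : List Char), cs.length ≤ n →
    (skipBal cs).map Subtype.val = (closePos cs 1).map (fun k => cs.drop (k + 1)) := by
  intro n
  induction n with
  | zero =>
    intro cs h
    have : cs = [] := List.length_eq_zero_iff.mp (Nat.le_zero.mp h)
    subst this
    simp [skipBal, closePos]
  | succ n ih =>
    intro cs h
    match cs with
    | [] => simp [skipBal, closePos]
    | ch :: rest =>
      have hrest : rest.length ≤ n := by
        simpa using Nat.lt_succ_iff.mp (Nat.lt_of_lt_of_le (by simp) h)
      rw [skipBal]
      by_cases h1 : ch = '>'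
      · subst h1
        simp [closePos]
      · by_cases h2 : ch = '<'
        · subst h2
          rw [if_neg (by decide), if_pos rfl]
          have hcp : closePos ('<' :: rest) 1 = (closePos rest 2).map (· + 1) := rfl
          have hnest := closePos_nest rest 1 le_rfl
          norm_num at hnest
          rw [hcp, hnest]
          cases hsr : skipBal rest with
          | none =>
            have hih := ih rest hrest
            rw [hsr] at hih
            have hnone : closePos rest 1 = none := by
              cases hc : closePos rest 1 with
              | none => rfl
              | some k => rw [hc] at hih; simp at hih
            rw [hnone]
            rfl
          | some x =>
            obtain ⟨r, hr⟩ := x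
            have hih := ih rest hrest
            rw [hsr] at hih
            cases hc : closePos rest 1 with
            | none => rw [hc] at hih; simp at hih
            | some k =>
              rw [hc] at hih
              simp only [Option.map_some] at hih
              have hrval : r = rest.drop (k + 1) := Option.some_inj.mp hih
              have hrlen : r.length ≤ n := le_trans (Nat.le_of_lt hr) hrest
              have hih2 := ih r hrlen
              simp only [Option.bind_some]
              rw [← hrval]
              cases hsr2 : skipBal r with
              | none =>
                rw [hsr2] at hih2
                have hnone2 : closePos r 1 = none := by
                  cases hc2 : closePos r 1 with
                  | none => rfl
                  | some m => rw [hc2] at hih2; simp at hih2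
                rw [hnone2]
                rfl
              | some y =>
                obtain ⟨r2, hr2⟩ := y
                rw [hsr2] at hih2
                cases hc2 : closePos r 1 with
                | none => rw [hc2] at hih2; simp at hih2
                | some m =>
                  rw [hc2] at hih2
                  simp only [Option.map_some] at hih2
                  have hr2val : r2 = r.drop (m + 1) := Option.some_inj.mp hih2
                  simp only [Option.map_some, List.drop_succ_cons]
                  have hfin : r2 = List.drop (k + 1 + m + 1) rest := by
                    rw [hr2val, hrval, List.drop_drop]
                    congr 1
                  rw [← hfin]
        · rw [if_neg h1, if_neg h2]
          have hcp : closePos (ch :: rest) 1 = (closePos rest 1).map (· + 1) := by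
            simp [closePos, h1, h2]
          rw [hcp]
          cases hsr : skipBal rest with
          | none =>
            have hih := ih rest hrest
            rw [hsr] at hih
            have hnone : closePos rest 1 = none := by
              cases hc : closePos rest 1 with
              | none => rfl
              | some k => rw [hc] at hih; simp at hih
            rw [hnone]
            rfl
          | some x =>
            obtain ⟨r, hr⟩ := x
            have hih := ih rest hrest
            rw [hsr] at hih
            cases hc : closePos rest 1 with
            | none => rw [hc] at hih; simp at hih
            | some k =>
              rw [hc] at hih
              simp only [Option.map_some] at hih
              have hrval : r = rest.drop (k + 1) := Option.some_inj.mp hih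
              simp only [Option.map_some, List.drop_succ_cons]
              rw [← hrval]

theorem slice_take (full : List Char) (n : Nat) :
    PySem.Chars.slice ('l' :: 'i' :: 's' :: 't' :: '<' :: full) (some 5) (some ((n : Int) + 5)) = full.take n := by
  rw [PySem.Chars.slice_eq_listSlice, PySem.List.slice_toNat _ (by norm_num) (by positivity)]
  have h5 : ((5 : Int)).toNat = 5 := rfl
  have hn : (((n : Int)) + 5).toNat = n + 5 := by omega
  rw [h5, hn]
  simp

theorem prefix_run (r : List Char) :
    splitLoopA ('l' :: 'i' :: 's' :: 't' :: '<' :: r) 0 0 none none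
      = splitLoopA r 5 1 (some 5) none := by
  simp [splitLoopA]

theorem split_eq (ty : String) : split_list_type_py ty = split_list_type_py_alt ty := by
  cases hp : PySem.Str.startswith ty "list<" with
  | false =>
    rw [split_list_type_py, if_pos hp, split_list_type_py_alt, if_pos hp]
  | true =>
    have hpl : "list<".toList <+: ty.toList := (PySem.Chars.startswith_iff _ _).mp
      (by rw [← PySem.Str.startswith_eq]; exact hp)
    obtain ⟨full, hfull⟩ := hpl
    have hL : ty.toList = 'l' :: 'i' :: 's' :: 't' :: '<' :: full := by
      rw [← hfull]; rfl
    have hdrop : ty.toList.drop 5 = full := by rw [hL]; rfl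
    have hAif : ¬ (PySem.Str.startswith ty "list<" = false) := by rw [hp]; decide
    have hA1 : splitLoopA ty.toList 0 0 none none
        = (some 5, Option.map (fun i : Nat => (i : Int) + 5) (closePos full 1)) := by
      rw [hL, prefix_run, splitLoopA_char _ _ _ _ (by omega)]
    have hlen : PySem.Str.len ty = (full.length : Int) + 5 := by
      rw [PySem.Str.len_eq, hL]; simp; omega
    have hB := skipBal_eq_aux full.length full le_rfl
    rw [split_list_type_py, if_neg hAif, hA1, split_list_type_py_alt, if_neg hAif, hdrop, hB]
    cases hc : closePos full 1 with
    | none => rfl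
    | some n =>
      simp only [Option.map_some]
      have hnlt := closePos_lt full 1 n hc
      by_cases hend : n + 1 = full.length
      · have hdn : full.drop (n + 1) = [] := by rw [List.drop_eq_nil_iff]; omega
        rw [hdn, if_neg (show ¬ ((n : Int) + 5 ≠ PySem.Str.len ty - 1) by rw [hlen]; omega)]
        have htake : full.take n = full.dropLast := by
          rw [List.dropLast_eq_take]; congr 1; omega
        rw [hL, slice_take, htake]
      · rw [if_pos (show ((n : Int) + 5 ≠ PySem.Str.len ty - 1) by rw [hlen]; omega)]
        cases hdc : full.drop (n + 1) with
        | nil =>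
          have := List.drop_eq_nil_iff.mp hdc
          omega
        | cons a as => rfl

-- ===== VERDICT (by name: the statement is the Claim_ definition above) =====
theorem split_list_type_py_spec : Claim_equal_split_list_type_py := by
  intro ty _
  exact split_eq ty
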